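-- pv_equiv track=rewrite | github.com/DongryeolLee96/AskCQ | CQDataset.py | parse_clarification_question
-- ===== SOURCE A (Python) =====
-- def parse_clarification_question(cq):
--     temp = cq.split(":", 1)
--     if len(temp) != 2:
--         return "invalid form", ["invalid form"]
--     category, option_string = temp
--     # def _extract_ap(ap):
--     #     if “Could you clarify ‘” in ap:
--     #         temp = “could you clarify ‘”
--     #         ap = ap[len(temp):-1]
--     #     elif “Could you clarify’” in ap:
--     #         temp = “could you clarify’”
--     #         ap = ap[len(temp):-1]
--     #     if “be more specific” in ap or len(ap) == 0:
--     #         ap = “SPECIFY”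
--     #     return ap
--     def _extract_options(option_string):
--         options = []
--         flag = False
--         def _is_valid(ch, future):
--             escapes = [", ", " ,", ",",
--                        ", or ", ",or ", ", or", ",or",
--                        ", ", ",", " ,",
--                        " or ", "or ", " or",
--                        "?", " ?"]
--             if any([future.startswith(es) for es in escapes]):
--                 return False
--             return True
--         for idx, ch in enumerate(option_string):
--             if "'" in ch and not flag:
--                 flag = True
--                 options.append("")
--             elif flag and _is_valid(ch, option_string[idx:]):
--                 options[-1] += ch
--                 continue
--             elif flag:
--                 flag=False
--         return options
--     # ap = _extract_ap(ap)
--     options = []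
--     for token in option_string.split(", or"):
--         for option in token.split(","):
--             options.append(option.strip(" ?"))
--     # options = _extract_options(option_string)
--     return category, options
-- ===== SOURCE B (Python) =====
-- def parse_clarification_question(cq):
--     head, sep, tail = cq.partition(":")
--     if not sep:
--         return "invalid form", ["invalid form"]
--     options, buf, i, n = [], [], 0, len(tail)
--     while i < n:
--         if tail[i] == ",":
--             options.append("".join(buf).strip(" ?"))
--             buf = []
--             i += 4 if tail.startswith(" or", i + 1) else 1
--         else:
--             buf.append(tail[i])
--             i += 1
--     options.append("".join(buf).strip(" ?"))
--     return head, options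
-- ===== Notes on version B (the rewrite author's own statement) =====
-- stated objective: alternative
-- what changed: A splits the tail twice (an outer split on the comma-or separator, then each piece on plain commas); B finds the category with a single partition at the first colon and builds the option list in one left-to-right character scan that closes a token at each comma, skipping three extra characters when the or-word follows.
import Mathlib
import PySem

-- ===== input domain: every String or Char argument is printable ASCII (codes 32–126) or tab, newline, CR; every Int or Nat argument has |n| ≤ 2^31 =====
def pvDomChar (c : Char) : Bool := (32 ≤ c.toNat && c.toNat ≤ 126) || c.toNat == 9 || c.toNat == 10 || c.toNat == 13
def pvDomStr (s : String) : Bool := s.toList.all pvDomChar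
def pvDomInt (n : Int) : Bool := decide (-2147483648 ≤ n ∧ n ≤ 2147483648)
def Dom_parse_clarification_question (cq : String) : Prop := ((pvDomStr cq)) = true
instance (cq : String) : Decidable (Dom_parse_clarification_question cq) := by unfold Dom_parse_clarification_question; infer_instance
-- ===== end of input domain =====

-- B replaces A's nested two-level split passes by a single left-to-right character scanner
-- that closes a token at each comma, skipping 3 extra characters when the or-word follows
-- (objective: alternative — one pass instead of split-then-split).

-- ===== PORT A =====
def parse_clarification_question (cq : String) : String × List String :=
  match (PySem.Str.splitMax? cq ":" 1).getD [] with
  | [category, option_string] =>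
      let options :=
        ((PySem.Str.split? option_string ", or").getD []).flatMap
          (fun token =>
            ((PySem.Str.split? token ",").getD []).map
              (fun option => PySem.Str.stripChars option " ?"))
      (category, options)
  | _ => ("invalid form", ["invalid form"])

-- ===== PORT B =====
-- hand port of str.partition(":") (exact for a single-character separator):
-- first ':' splits the string; none = separator absent
def pcqPartition : List Char → Option (List Char × List Char)
  | [] => none
  | c :: rest =>
      if c = ':' then some ([], rest)
      else (pcqPartition rest).map (fun p => (c :: p.1, p.2))

-- the while-loop of Source B: buf is the current token, acc the finished options
def pcqScan : List Char → List Char → List String → List String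
  | [], buf, acc => acc ++ [PySem.Str.stripChars (String.ofList buf) " ?"]
  | c :: rest, buf, acc =>
      if c = ',' then
        let acc' := acc ++ [PySem.Str.stripChars (String.ofList buf) " ?"]
        if PySem.Chars.startswith rest (" or".toList) then
          pcqScan (rest.drop 3) [] acc'
        else
          pcqScan rest [] acc'
      else pcqScan rest (buf ++ [c]) acc
  termination_by l _ _ => l.length
  decreasing_by
  · simp only [List.length_drop, List.length_cons]; omega
  · simp only [List.length_cons]; omega
  · simp only [List.length_cons]; omega

def parse_clarification_question_alt (cq : String) : String × List String :=
  match pcqPartition cq.toList with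
  | none => ("invalid form", ["invalid form"])
  | some (h, t) => (String.ofList h, pcqScan t [] [])

-- ===== PRECONDITION & SPEC =====
def Spec_parse_clarification_question (cq : String) (out : String × List String) : Prop := out = parse_clarification_question_alt cq
instance (cq : String) (out : String × List String) : Decidable (Spec_parse_clarification_question cq out) := by unfold Spec_parse_clarification_question; infer_instance

-- ===== CLAIM (what is proved, stated in full; the proofs are below) =====
def Claim_equal_parse_clarification_question : Prop := ∀ (cq : String), Dom_parse_clarification_question cq → Spec_parse_clarification_question cq (parse_clarification_question cq)

-- ===== LEMMAS AND PROOFS =====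

-- simple recursive characterisation of Python's s.split(sep) for sep ≠ []
def splitR (sep : List Char) : List Char → List (List Char)
  | [] => [[]]
  | c :: rest =>
      if h : sep ≠ [] ∧ sep.isPrefixOf (c :: rest) then
        [] :: splitR sep ((c :: rest).drop sep.length)
      else
        match splitR sep rest with
        | [] => [[c]]
        | p :: ps => (c :: p) :: ps
  termination_by l => l.length
  decreasing_by
  · rcases h with ⟨h1, _⟩
    simp only [List.length_drop, List.length_cons]
    cases sep with
    | nil => exact absurd rfl h1
    | cons a s => simp
  · simp only [List.length_cons]; omega

theorem splitR_ne_nil (sep l : List Char) : splitR sep l ≠ [] := by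
  cases l with
  | nil => simp [splitR]
  | cons c rest =>
    rw [splitR]
    split
    · simp
    · split <;> simp

theorem splitOnMax_go_zero (sep : List Char) (fuel : Nat) (l cur : List Char)
    (acc : List (List Char)) (hf : 1 ≤ fuel) :
    PySem.Chars.splitOnMax.go sep fuel 0 l cur acc = acc.reverse ++ [cur.reverse ++ l] := by
  match fuel, l with
  | f+1, [] => simp [PySem.Chars.splitOnMax.go]
  | f+1, c :: rest => simp [PySem.Chars.splitOnMax.go]

theorem splitOnMax_go_colon (l : List Char) (fuel : Nat) (cur : List Char)
    (acc : List (List Char)) (hf : l.length < fuel) :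
    PySem.Chars.splitOnMax.go [':'] fuel 1 l cur acc =
      acc.reverse ++ (match pcqPartition l with
        | none => [cur.reverse ++ l]
        | some (h, t) => [cur.reverse ++ h, t]) := by
  induction l generalizing fuel cur acc with
  | nil =>
    match fuel with
    | f+1 => simp [PySem.Chars.splitOnMax.go, pcqPartition]
  | cons c rest ih =>
    match fuel with
    | f+1 =>
      have hr : rest.length < f := by simpa using hf
      by_cases hc : c = ':'
      · subst hc
        rw [PySem.Chars.splitOnMax.go]
        have hpre : List.isPrefixOf [':'] (':' :: rest) = true := by simp [List.isPrefixOf]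
        simp only [hpre, if_true, pcqPartition]
        norm_num
        rw [splitOnMax_go_zero [':'] f rest [] (cur.reverse :: acc) (by omega)]
        simp
      · rw [PySem.Chars.splitOnMax.go]
        have hpre : List.isPrefixOf [':'] (c :: rest) = false := by
          simp [List.isPrefixOf]
          exact Ne.symm hc
        simp only [hpre, if_false, Nat.one_ne_zero]
        rw [ih f (c :: cur) acc hr]
        simp only [pcqPartition, if_neg hc]
        cases hp : pcqPartition rest with
        | none => simp
        | some p => cases p with
          | mk h t => simp

theorem modifyHead_id' {α : Type} (l : List α) : l.modifyHead (fun x => x) = l := by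
  cases l <;> simp

theorem splitOn_go_eq (sep : List Char) (hsep : sep ≠ []) :
    ∀ (fuel : Nat) (l cur : List Char) (acc : List (List Char)), l.length < fuel →
    PySem.Chars.splitOn.go sep fuel l cur acc =
      acc.reverse ++ (splitR sep l).modifyHead (cur.reverse ++ ·) := by
  intro fuel
  induction fuel with
  | zero => intro l cur acc hf; omega
  | succ f ih =>
    intro l cur acc hf
    cases l with
    | nil => simp [PySem.Chars.splitOn.go, splitR]
    | cons c rest =>
      rw [PySem.Chars.splitOn.go]
      by_cases hp : sep.isPrefixOf (c :: rest) = true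
      · simp only [hp, if_true]
        have h1 : 1 ≤ sep.length := by
          cases sep with
          | nil => exact absurd rfl hsep
          | cons a s => simp
        have hlen : (List.drop sep.length (c :: rest)).length < f := by
          simp only [List.length_drop, List.length_cons]
          simp only [List.length_cons] at hf
          omega
        rw [ih _ _ _ hlen]
        rw [splitR, dif_pos ⟨hsep, hp⟩]
        simp [modifyHead_id']
      · simp only [hp, if_false, Bool.false_eq_true]
        have hlen : rest.length < f := by simpa using hf
        rw [ih _ _ _ hlen]
        rw [splitR, dif_neg (by intro h; exact hp h.2)]
        cases hsp : splitR sep rest with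
        | nil => exact absurd hsp (splitR_ne_nil sep rest)
        | cons p ps => simp

theorem splitOn_eq (sep l : List Char) (hsep : sep ≠ []) :
    PySem.Chars.splitOn l sep = splitR sep l := by
  rw [PySem.Chars.splitOn, splitOn_go_eq sep hsep (l.length + 1) l [] [] (by omega)]
  simp [modifyHead_id']

-- the flattened two-level split A computes on the tail
def pcqComp (l : List Char) : List (List Char) :=
  ((splitR [',', ' ', 'o', 'r'] l).map (splitR [','])).flatten

theorem pcqComp_ne_nil (l : List Char) : pcqComp l ≠ [] := by
  unfold pcqComp
  cases hs : splitR [',', ' ', 'o', 'r'] l with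
  | nil => exact absurd hs (splitR_ne_nil _ _)
  | cons p ps =>
    simp only [List.map_cons, List.flatten_cons]
    intro hcon
    exact splitR_ne_nil [','] p (List.append_eq_nil_iff.mp hcon).1

theorem pcqComp_nil : pcqComp [] = [[]] := by
  simp [pcqComp, splitR]

theorem pcqComp_comma_or (rest : List Char) (h : [' ', 'o', 'r'].isPrefixOf rest = true) :
    pcqComp (',' :: rest) = [] :: pcqComp (rest.drop 3) := by
  unfold pcqComp
  rw [splitR, dif_pos ⟨by simp, by simp [List.isPrefixOf, h]⟩]
  simp [splitR]

theorem pcqComp_comma (rest : List Char) (h : [' ', 'o', 'r'].isPrefixOf rest = false) :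
    pcqComp (',' :: rest) = [] :: pcqComp rest := by
  unfold pcqComp
  rw [splitR, dif_neg (by simp [List.isPrefixOf, h])]
  cases hs : splitR [',', ' ', 'o', 'r'] rest with
  | nil => exact absurd hs (splitR_ne_nil _ _)
  | cons p ps =>
    simp only [List.map_cons, List.flatten_cons]
    rw [splitR, dif_pos ⟨by simp, by simp [List.isPrefixOf]⟩]
    simp

theorem pcqComp_cons (c : Char) (rest : List Char) (hc : c ≠ ',') :
    pcqComp (c :: rest) = (pcqComp rest).modifyHead (c :: ·) := by
  unfold pcqComp
  rw [splitR, dif_neg (by simp [List.isPrefixOf]; intro h; exact absurd h.symm hc)]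
  cases hs : splitR [',', ' ', 'o', 'r'] rest with
  | nil => exact absurd hs (splitR_ne_nil _ _)
  | cons p ps =>
    simp only [List.map_cons, List.flatten_cons]
    rw [splitR, dif_neg (by simp [List.isPrefixOf]; intro h; exact absurd h.symm hc)]
    cases hq : splitR [','] p with
    | nil => exact absurd hq (splitR_ne_nil _ _)
    | cons q qs => simp

theorem pcqScan_eq (n : Nat) : ∀ (cs : List Char), cs.length ≤ n → ∀ (buf : List Char) (acc : List String),
    pcqScan cs buf acc =
      acc ++ ((pcqComp cs).modifyHead (buf ++ ·)).map
        (fun p => PySem.Str.stripChars (String.ofList p) " ?") := by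
  induction n with
  | zero =>
    intro cs hlen buf acc
    have : cs = [] := List.eq_nil_of_length_eq_zero (Nat.le_zero.mp hlen)
    subst this
    simp [pcqScan, pcqComp_nil]
  | succ n ih =>
    intro cs hlen buf acc
    cases cs with
    | nil => simp [pcqScan, pcqComp_nil]
    | cons c rest =>
      by_cases hc : c = ','
      · subst hc
        by_cases hor : PySem.Chars.startswith rest (" or".toList) = true
        · rw [pcqScan, if_pos rfl, if_pos hor]
          have hor' : [' ', 'o', 'r'].isPrefixOf rest = true := by
            simpa [PySem.Chars.startswith] using hor
          rw [ih (rest.drop 3) (by simp at hlen ⊢; omega) [] _]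
          rw [pcqComp_comma_or rest hor']
          cases hcm : pcqComp (rest.drop 3) with
          | nil => exact absurd hcm (pcqComp_ne_nil _)
          | cons p ps => simp
        · rw [pcqScan, if_pos rfl, if_neg hor]
          have hor' : [' ', 'o', 'r'].isPrefixOf rest = false := by
            rw [Bool.eq_false_iff]
            intro hx
            exact hor (by simpa [PySem.Chars.startswith] using hx)
          rw [ih rest (by simp at hlen ⊢; omega) [] _]
          rw [pcqComp_comma rest hor']
          cases hcm : pcqComp rest with
          | nil => exact absurd hcm (pcqComp_ne_nil _)
          | cons p ps => simp
      · rw [pcqScan, if_neg hc]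
        rw [ih rest (by simp at hlen ⊢; omega) (buf ++ [c]) acc]
        rw [pcqComp_cons c rest hc]
        cases hcm : pcqComp rest with
        | nil => exact absurd hcm (pcqComp_ne_nil _)
        | cons p ps => simp

-- ===== VERDICT (by name: the statement is the Claim_ definition above) =====
theorem splitMax_colon (cq : String) :
    (PySem.Str.splitMax? cq ":" 1).getD [] =
      (match pcqPartition cq.toList with
        | none => [cq.toList]
        | some (h, t) => [h, t]).map String.ofList := by
  rw [PySem.Str.splitMax?]
  have hsep : (":".toList : List Char) = [':'] := by decide
  rw [hsep, PySem.Chars.splitMax?]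
  simp only [List.isEmpty_cons, if_false, Option.map_some, Option.getD_some, Bool.false_eq_true]
  rw [PySem.Chars.splitOnMax, if_neg (by norm_num)]
  have : (1 : Int).toNat = 1 := rfl
  rw [this, splitOnMax_go_colon cq.toList (cq.toList.length + 1) [] [] (by omega)]
  cases hp : pcqPartition cq.toList with
  | none => simp
  | some p => cases p with | mk h t => simp

theorem options_eq (t : List Char) :
    ((PySem.Str.split? (String.ofList t) ", or").getD []).flatMap
        (fun token => ((PySem.Str.split? token ",").getD []).map
          (fun option => PySem.Str.stripChars option " ?")) =
      pcqScan t [] [] := by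
  rw [pcqScan_eq t.length t le_rfl [] []]
  have hmh : (pcqComp t).modifyHead (fun x => [] ++ x) = pcqComp t := by
    simpa using modifyHead_id' (pcqComp t)
  rw [List.nil_append, hmh]
  rw [PySem.Str.split?]
  have h1 : ((String.ofList t).toList : List Char) = t := by simp
  have h2 : (", or".toList : List Char) = [',', ' ', 'o', 'r'] := by decide
  rw [h1, h2, PySem.Chars.split?]
  simp only [List.isEmpty_cons, if_false, Option.map_some, Option.getD_some, Bool.false_eq_true]
  rw [splitOn_eq _ t (by simp)]
  rw [List.flatMap_map]
  rw [pcqComp, List.map_flatten, List.map_map]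
  rw [List.flatMap_def]
  congr 1
  apply List.map_congr_left
  intro a _
  rw [PySem.Str.split?]
  have h3 : (",".toList : List Char) = [','] := by decide
  rw [h3, PySem.Chars.split?]
  simp only [List.isEmpty_cons, Bool.false_eq_true, if_false, Option.map_some, Option.getD_some]
  have h4 : ((String.ofList a).toList : List Char) = a := by simp
  rw [h4, splitOn_eq [','] a (by simp)]
  simp [List.map_map, Function.comp]

theorem parse_clarification_question_spec : Claim_equal_parse_clarification_question := by
  intro cq _
  unfold Spec_parse_clarification_question
  unfold parse_clarification_question parse_clarification_question_alt
  rw [splitMax_colon cq]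
  cases hp : pcqPartition cq.toList with
  | none => simp
  | some p =>
    cases p with
    | mk h t =>
      simp only [List.map_cons, List.map_nil]
      rw [options_eq t]
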